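-- pv_equiv track=rewrite | github.com/jnnnnn/jnnnnn.github.io | printbook/epub2print.py | _is_mid_sentence
-- ===== SOURCE A (Python) =====
-- def _is_mid_sentence(pos: int, text: str) -> bool:
--     """Check if position is mid-sentence (not after sentence-ending punctuation)."""
--     if pos == 0:
--         return False
--     i = pos - 1
--     while i >= 0 and text[i] in ' \t\n\r':
--         i -= 1
--     if i < 0:
--         return False
--     if text[i] in '.!?:;\u2014\u2026':
--         return False
--     if text[i] in '"\u201d\u2019\u201c\'' and i > 0 and text[i-1] in '.!?':
--         return False
--     return True
-- ===== SOURCE B (Python) =====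
-- def _is_mid_sentence(pos: int, text: str) -> bool:
--     """Check if position is mid-sentence (not after sentence-ending punctuation)."""
--     if pos <= 0:
--         return False
--     mid = False
--     prev = ' '
--     for ch in text[:pos]:
--         if ch in ' \t\n\r':
--             pass  # whitespace does not change sentence state
--         elif ch in '.!?:;\u2014\u2026':
--             mid = False
--         elif ch in '"\u201d\u2019\u201c\'' and prev in '.!?':
--             mid = False
--         else:
--             mid = True
--         prev = ch
--     return mid
-- ===== Notes on version B (the rewrite author's own statement) =====
-- stated objective: alternative
-- what changed: Replaces A's backward whitespace-skipping index scan with a single forward left-fold over text[:pos] maintaining a (mid, prev-char) state machine; it trades A's early exit from the end for a uniform forward pass over the whole prefix.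
-- outside the precondition, e.g. on _is_mid_sentence(4, 'ab'): A raises IndexError, B returns True
import Mathlib
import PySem

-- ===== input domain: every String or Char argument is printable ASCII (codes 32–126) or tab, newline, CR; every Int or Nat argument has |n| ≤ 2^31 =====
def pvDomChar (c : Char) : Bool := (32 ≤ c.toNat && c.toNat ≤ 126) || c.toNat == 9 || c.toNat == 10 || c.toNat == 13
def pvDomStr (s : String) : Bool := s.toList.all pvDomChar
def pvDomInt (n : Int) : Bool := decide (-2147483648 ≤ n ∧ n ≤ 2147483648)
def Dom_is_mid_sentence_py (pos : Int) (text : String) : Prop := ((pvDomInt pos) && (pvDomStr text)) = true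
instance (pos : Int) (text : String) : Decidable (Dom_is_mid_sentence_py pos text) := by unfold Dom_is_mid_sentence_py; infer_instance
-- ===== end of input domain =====

-- B replaces A's backward whitespace-skipping scan with a single forward left-fold over
-- text[:pos] maintaining a (mid, previous-char) state (objective: alternative, same cost).

-- character-class predicates shared by both ports (the Python string literals ' \t\n\r',
-- '.!?:;—…', '"”’“\'' and '.!?' used in membership tests)
def pvWS (c : Char) : Bool := c = ' ' || c = '\t' || c = '\n' || c = '\r'
def pvEnd (c : Char) : Bool := c = '.' || c = '!' || c = '?' || c = ':' || c = ';' || c = '\u2014' || c = '\u2026'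
def pvQuote (c : Char) : Bool := c = '"' || c = '\u201d' || c = '\u2019' || c = '\u201c' || c = '\''
def pvDot (c : Char) : Bool := c = '.' || c = '!' || c = '?'

-- ===== PORT A =====
-- the while loop 'while i >= 0 and text[i] in " \t\n\r": i -= 1', run from index j downwards;
-- none = the Python IndexError from text[j] when j is out of range (outside Pre_)
def pvScanA (cs : List Char) : Nat → Option Int
  | 0 =>
    match PySem.List.pyGet? cs 0 with
    | none => none
    | some c => if pvWS c then some (-1) else some 0
  | j+1 =>
    match PySem.List.pyGet? cs ((j : Int) + 1) with
    | none => none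
    | some c => if pvWS c then pvScanA cs j else some ((j : Int) + 1)

def is_mid_sentence_py (pos : Int) (text : String) : Bool :=
  if pos = 0 then false
  else if pos - 1 < 0 then false      -- loop body never runs, i = pos - 1 < 0, so 'if i < 0: return False'
  else
    match pvScanA text.toList (pos - 1).toNat with
    | none => false                   -- Python raises IndexError here (pos > len(text)); excluded by Pre_
    | some i =>
      if i < 0 then false
      else
        match PySem.List.pyGet? text.toList i with
        | none => false               -- unreachable: the scan returned an in-range index
        | some c =>
          if pvEnd c then false
          else if pvQuote c && decide (0 < i) &&
                  ((PySem.List.pyGet? text.toList (i - 1)).elim false pvDot) then false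
          else true

-- ===== PORT B =====
-- one iteration of B's for-loop body: state = (mid, prev), branches in Python's order
def pvStepB (st : Bool × Char) (ch : Char) : Bool × Char :=
  if pvWS ch then (st.1, ch)
  else if pvEnd ch then (false, ch)
  else if pvQuote ch && pvDot st.2 then (false, ch)
  else (true, ch)

def is_mid_sentence_py_alt (pos : Int) (text : String) : Bool :=
  if pos ≤ 0 then false
  else ((PySem.List.slice text.toList none (some pos)).foldl pvStepB (false, ' ')).1

-- ===== PRECONDITION & SPEC =====
-- Pre_ excludes exactly the inputs with pos > len(text), on which A raises IndexError.
def Pre_is_mid_sentence_py (pos : Int) (text : String) : Prop := pos ≤ text.toList.length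
instance (pos : Int) (text : String) : Decidable (Pre_is_mid_sentence_py pos text) := by
  unfold Pre_is_mid_sentence_py; infer_instance

def pvWitness_is_mid_sentence_py : Int × String := (2, "a b")

def Spec_is_mid_sentence_py (pos : Int) (text : String) (out : Bool) : Prop := out = is_mid_sentence_py_alt pos text
instance (pos : Int) (text : String) (out : Bool) : Decidable (Spec_is_mid_sentence_py pos text out) := by
  unfold Spec_is_mid_sentence_py; infer_instance

-- ===== CLAIM (what is proved, stated in full; the proofs are below) =====
def Claim_equal_is_mid_sentence_py : Prop := ∀ (pos : Int) (text : String), Dom_is_mid_sentence_py pos text → Pre_is_mid_sentence_py pos text → Spec_is_mid_sentence_py pos text (is_mid_sentence_py pos text)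

-- ===== LEMMAS AND PROOFS =====

-- the value A computes from the last non-whitespace index i (with prev-char ' ' when i = 0)
def pvVal (cs : List Char) (i : Nat) : Bool :=
  let c := cs.getD i ' '
  let p := if i = 0 then ' ' else cs.getD (i-1) ' '
  if pvEnd c then false else if pvQuote c && pvDot p then false else true

theorem pvStepB_snd (st : Bool × Char) (ch : Char) : (pvStepB st ch).2 = ch := by
  unfold pvStepB; split_ifs <;> rfl

-- key invariant: folding B's step over cs.take (j+1) yields prev = cs[j] and
-- mid = false on an all-whitespace prefix, else mid = pvVal at the scan's index
theorem pvFold_scan (cs : List Char) :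
    ∀ j : Nat, j < cs.length →
      ((cs.take (j+1)).foldl pvStepB (false, ' ')).2 = cs.getD j ' ' ∧
      ((pvScanA cs j = some (-1) ∧ ((cs.take (j+1)).foldl pvStepB (false, ' ')).1 = false) ∨
       (∃ i : Nat, i ≤ j ∧ pvScanA cs j = some (i : Int) ∧
          ((cs.take (j+1)).foldl pvStepB (false, ' ')).1 = pvVal cs i)) := by
  intro j
  induction j with
  | zero =>
    intro hj
    have hget : PySem.List.pyGet? cs (0 : Int) = some cs[0] := by
      rw [PySem.List.pyGet?_zero, List.getElem?_eq_getElem hj]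
    have htake1 : cs.take 1 = [cs[0]] := by
      cases cs with
      | nil => simp at hj
      | cons a l => simp
    have hgd : cs.getD 0 ' ' = cs[0] := by
      simp [List.getD, List.getElem?_eq_getElem hj]
    rw [htake1]
    constructor
    · simp only [List.foldl]; rw [pvStepB_snd, hgd]
    · by_cases hws : pvWS cs[0] = true
      · left
        constructor
        · simp [pvScanA, hget, hws]
        · simp [pvStepB, hws]
      · right
        refine ⟨0, le_refl _, ?_, ?_⟩
        · simp [pvScanA, hget, hws]
        · simp [pvStepB, pvVal, hws]
          have : pvDot ' ' = false := rfl
          split_ifs with h1 h2 <;> simp_all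
  | succ j ih =>
    intro hj
    have hjlt : (j : Int) + 1 = ((j+1 : Nat) : Int) := by push_cast; ring
    have hget : PySem.List.pyGet? cs ((j : Int) + 1) = some cs[j+1] := by
      rw [hjlt, PySem.List.pyGet?_natCast, List.getElem?_eq_getElem hj]
    have htake : cs.take (j+2) = cs.take (j+1) ++ [cs[j+1]] := by
      rw [List.take_add_one, List.getElem?_eq_getElem hj]; simp
    have hgd : cs.getD (j+1) ' ' = cs[j+1] := by
      simp [List.getD, List.getElem?_eq_getElem hj]
    obtain ⟨ihp, ihm⟩ := ih (Nat.lt_of_succ_lt hj)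
    have hfold : (cs.take (j+2)).foldl pvStepB (false, ' ')
        = pvStepB ((cs.take (j+1)).foldl pvStepB (false, ' ')) cs[j+1] := by
      rw [htake, List.foldl_append]; rfl
    constructor
    · rw [hfold, pvStepB_snd, hgd]
    · by_cases hws : pvWS cs[j+1] = true
      · have hscan : pvScanA cs (j+1) = pvScanA cs j := by
          rw [pvScanA.eq_2, hget]; simp [hws]
        have hmid : ((cs.take (j+2)).foldl pvStepB (false, ' ')).1
            = ((cs.take (j+1)).foldl pvStepB (false, ' ')).1 := by
          rw [hfold]; unfold pvStepB; simp [hws]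
        rcases ihm with ⟨h1, h2⟩ | ⟨i, hi, h1, h2⟩
        · left; exact ⟨hscan.trans h1, hmid.trans h2⟩
        · right; exact ⟨i, Nat.le_succ_of_le hi, hscan.trans h1, hmid.trans h2⟩
      · right
        refine ⟨j+1, le_refl _, ?_, ?_⟩
        · rw [pvScanA.eq_2, hget]; simp [hws]
        · rw [hfold]
          set st := (cs.take (j+1)).foldl pvStepB (false, ' ') with hst
          simp only [pvStepB, pvVal, ihp, hws, Bool.false_eq_true, if_false, hgd,
            if_neg (Nat.succ_ne_zero j), Nat.add_sub_cancel]
          split_ifs <;> simp_all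

-- ===== VERDICT (by name: the statement is the Claim_ definition above) =====
theorem is_mid_sentence_py_spec : Claim_equal_is_mid_sentence_py := by
  intro pos text hdom hpre
  unfold Spec_is_mid_sentence_py
  unfold Pre_is_mid_sentence_py at hpre
  by_cases h0 : pos ≤ 0
  · unfold is_mid_sentence_py is_mid_sentence_py_alt
    simp only [if_pos h0]
    by_cases hz : pos = 0
    · simp [hz]
    · rw [if_neg hz, if_pos (show pos - 1 < 0 by omega)]
  · have hz : ¬ pos = 0 := by omega
    have hm : ¬ pos - 1 < 0 := by omega
    have hjl : (pos - 1).toNat < text.toList.length := by omega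
    have hslice : PySem.List.slice text.toList none (some pos) = text.toList.take pos.toNat :=
      PySem.List.slice_to text.toList (by omega)
    have hpostake : text.toList.take pos.toNat = text.toList.take ((pos - 1).toNat + 1) := by
      congr 1; omega
    obtain ⟨-, hm2⟩ := pvFold_scan text.toList (pos - 1).toNat hjl
    unfold is_mid_sentence_py is_mid_sentence_py_alt
    rw [if_neg hz, if_neg hm, if_neg h0, hslice, hpostake]
    rcases hm2 with ⟨hscan, hmid⟩ | ⟨i, hij, hscan, hmid⟩
    · rw [hscan, hmid]; norm_num
    · have hil : i < text.toList.length := lt_of_le_of_lt hij hjl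
      rw [hscan, hmid]
      by_cases hi0 : i = 0
      · subst hi0
        simp [pvVal, PySem.List.pyGet?_zero, List.getElem?_eq_getElem hil,
          show pvDot ' ' = false from rfl]
      · have hprevA : PySem.List.pyGet? text.toList ((i : Int) - 1) = some (text.toList[i-1]) := by
          have e : (i : Int) - 1 = ((i - 1 : Nat) : Int) := by omega
          rw [e, PySem.List.pyGet?_natCast, List.getElem?_eq_getElem (by omega)]
        simp [pvVal, hprevA, hi0, List.getElem?_eq_getElem hil,
          List.getElem?_eq_getElem (show i - 1 < text.toList.length by omega),
          show 0 < i by omega, show ¬((i:Int) < 0) by omega]
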